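-- pv_equiv track=rewrite | github.com/arielbr/machine_learning_hw | hw 4/kernels.py | compute_df
-- ===== SOURCE A (Python) =====
-- def compute_df(X, vocab):
--     """
--     Compute the df for each word in the vocab.
--     You may choose to use or not use this helper function.
--
--     Args:
--         X: A list of strings, where each string corresponds to a document.
--         vocab: A set of distinct words that occur in the corpus.
--
--     Returns:
--         A data structure containing df values.
--     """
--     df = dict()
--     for v in vocab:
--         df[v] = 0
--     # list of set, each contains all words in a doc
--     doc_list = []
--     for x in X:
--         doc_list.append(set(x.split(" ")))
--     for doc in doc_list:
--         for word in df.keys():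
--             if word in doc:
--                 df[word] += 1
--     return df
-- ===== SOURCE B (Python) =====
-- def compute_df(X, vocab):
--     vset = set(vocab)
--     counts = {}
--     for x in X:
--         for w in set(x.split(" ")):
--             if w in vset:
--                 counts[w] = counts.get(w, 0) + 1
--     df = {}
--     for v in vocab:
--         df[v] = counts.get(v, 0)
--     return df
-- ===== Notes on version B (the rewrite author's own statement) =====
-- stated objective: faster
-- what changed: Instead of scanning every vocab word against every document set (|vocab|*|docs| membership tests), B makes one pass over each document's distinct words, incrementing a counter dict only for words in the vocab set, then reads the counts off in vocab order.
import Mathlib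
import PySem

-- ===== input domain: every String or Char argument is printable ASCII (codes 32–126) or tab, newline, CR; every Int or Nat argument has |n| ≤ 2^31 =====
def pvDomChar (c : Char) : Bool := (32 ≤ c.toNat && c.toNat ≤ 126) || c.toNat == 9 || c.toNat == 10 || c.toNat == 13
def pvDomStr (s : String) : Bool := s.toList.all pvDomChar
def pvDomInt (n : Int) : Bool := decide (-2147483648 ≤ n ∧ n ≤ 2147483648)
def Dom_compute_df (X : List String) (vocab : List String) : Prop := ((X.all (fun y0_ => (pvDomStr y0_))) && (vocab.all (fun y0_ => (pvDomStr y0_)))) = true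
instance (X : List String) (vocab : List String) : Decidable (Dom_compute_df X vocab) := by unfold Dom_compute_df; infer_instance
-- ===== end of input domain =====

-- B replaces A's per-document scan over the whole vocab by one pass over each document's
-- distinct words with a counter dict, read back in vocab order (objective: faster).

-- ===== PORT A =====
-- x.split(" ") with the non-empty literal separator " " (split? is some exactly then)
def pvSplitSp (s : String) : List String := (PySem.Str.split? s " ").getD []

def compute_df (X : List String) (vocab : List String) : List (String × Int) :=
  let df : PySem.Dict String Int :=
    vocab.foldl (fun d v => d.insert v 0) PySem.Dict.empty
  let doc_list : List (PySem.Set String) :=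
    X.foldl (fun acc x => acc ++ [PySem.Set.ofList (pvSplitSp x)]) []
  -- df[word] += 1 : word is always a key of df, so modify with default 0 is exact
  (doc_list.foldl (fun d doc =>
      d.keys.foldl (fun d' word =>
        if PySem.Set.contains doc word then d'.modify word 0 (· + 1) else d') d) df).items

-- ===== PORT B =====
def compute_df_alt (X : List String) (vocab : List String) : List (String × Int) :=
  let vset : PySem.Set String := PySem.Set.ofList vocab
  let counts : PySem.Dict String Int :=
    X.foldl (fun c x =>
      (PySem.Set.ofList (pvSplitSp x)).foldl
        (fun c' w => if PySem.Set.contains vset w then c'.insert w (c'.getD w 0 + 1) else c') c)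
      PySem.Dict.empty
  (vocab.foldl (fun d v => d.insert v (counts.getD v 0)) PySem.Dict.empty).items

-- ===== PRECONDITION & SPEC =====
def Spec_compute_df (X : List String) (vocab : List String) (out : List (String × Int)) : Prop := out = compute_df_alt X vocab
instance (X : List String) (vocab : List String) (out : List (String × Int)) : Decidable (Spec_compute_df X vocab out) := by unfold Spec_compute_df; infer_instance

-- ===== CLAIM (what is proved, stated in full; the proofs are below) =====
def Claim_equal_compute_df : Prop := ∀ (X : List String) (vocab : List String), Dom_compute_df X vocab → Spec_compute_df X vocab (compute_df X vocab)

-- ===== LEMMAS AND PROOFS =====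
theorem pv_update_of_subset (l : List String) (s : PySem.Set String) (h : ∀ x ∈ l, x ∈ s) :
    PySem.Set.update s l = s := by
  induction l generalizing s with
  | nil => rfl
  | cons x l ih =>
    show PySem.Set.update (s.add x) l = s
    rw [PySem.Set.add_of_mem (h x (by simp))]
    exact ih s (fun y hy => h y (by simp [hy]))

theorem pv_contains_iff (s : PySem.Set String) (w : String) :
    PySem.Set.contains s w = true ↔ w ∈ s := by simp [PySem.Set.contains]

theorem pvA_step_keys (doc : PySem.Set String) (d : PySem.Dict String Int) :
    (d.keys.foldl (fun d' word =>
      if PySem.Set.contains doc word then d'.modify word 0 (· + 1) else d') d).keys = d.keys := by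
  rw [← List.foldl_filter, PySem.Dict.keys_foldl_modify]
  exact pv_update_of_subset _ _ (fun x hx => (List.mem_filter.mp hx).1)

theorem pvA_step_getD (doc : PySem.Set String) (d : PySem.Dict String Int)
    (hnd : d.keys.Nodup) (w : String) (hw : w ∈ d.keys) :
    (d.keys.foldl (fun d' word =>
      if PySem.Set.contains doc word then d'.modify word 0 (· + 1) else d') d).getD w 0
    = d.getD w 0 + (if PySem.Set.contains doc w then 1 else 0) := by
  rw [← List.foldl_filter, PySem.Dict.getD_foldl_modify_add_one]
  congr 1
  by_cases hc : PySem.Set.contains doc w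
  · rw [List.count_filter hc, if_pos hc]
    exact_mod_cast List.count_eq_one_of_mem hnd hw
  · have h0 : w ∉ List.filter (fun word => PySem.Set.contains doc word) d.keys := by
      intro h; exact hc (List.mem_filter.mp h).2
    rw [if_neg hc, List.count_eq_zero.mpr h0]; simp

theorem pvA_loop (docs : List (PySem.Set String)) (d : PySem.Dict String Int)
    (hnd : d.keys.Nodup) :
    (docs.foldl (fun d doc => d.keys.foldl (fun d' word =>
        if PySem.Set.contains doc word then d'.modify word 0 (· + 1) else d') d) d).keys = d.keys
    ∧ ∀ w ∈ d.keys, (docs.foldl (fun d doc => d.keys.foldl (fun d' word =>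
        if PySem.Set.contains doc word then d'.modify word 0 (· + 1) else d') d) d).getD w 0
      = d.getD w 0 + (docs.countP (fun doc => PySem.Set.contains doc w) : Int) := by
  induction docs generalizing d with
  | nil => exact ⟨rfl, fun w _ => by simp⟩
  | cons doc docs ih =>
    have hk := pvA_step_keys doc d
    have ih' := ih (d.keys.foldl (fun d' word =>
        if PySem.Set.contains doc word then d'.modify word 0 (· + 1) else d') d)
        (by rw [hk]; exact hnd)
    refine ⟨by rw [List.foldl_cons, ih'.1, hk], fun w hw => ?_⟩
    rw [List.foldl_cons, ih'.2 w (by rw [hk]; exact hw), pvA_step_getD doc d hnd w hw,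
      List.countP_cons]
    by_cases hc : PySem.Set.contains doc w <;> simp [hc] <;> push_cast <;> ring

theorem pvB_step_getD (p doc : PySem.Set String) (hnd : doc.Nodup)
    (c : PySem.Dict String Int) (w : String) :
    (doc.foldl (fun c' w =>
      if PySem.Set.contains p w then c'.insert w (c'.getD w 0 + 1) else c') c).getD w 0
    = c.getD w 0 + (if PySem.Set.contains p w then
        (if PySem.Set.contains doc w then (1:Int) else 0) else 0) := by
  rw [← List.foldl_filter, PySem.Dict.getD_foldl_insert_add_one]
  congr 1
  by_cases hc : PySem.Set.contains p w
  · by_cases hm : w ∈ doc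
    · rw [List.count_filter hc, if_pos hc, if_pos ((pv_contains_iff _ _).mpr hm)]
      exact_mod_cast List.count_eq_one_of_mem hnd hm
    · have h0 : w ∉ List.filter (fun x => PySem.Set.contains p x) doc := by
        intro h; exact hm (List.mem_filter.mp h).1
      have h1 : ¬ PySem.Set.contains doc w = true := fun h => hm ((pv_contains_iff _ _).mp h)
      rw [if_pos hc, if_neg h1, List.count_eq_zero.mpr h0]; simp
  · have h0 : w ∉ List.filter (fun x => PySem.Set.contains p x) doc := by
      intro h; exact hc (List.mem_filter.mp h).2
    rw [if_neg hc, List.count_eq_zero.mpr h0]; simp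

theorem pvB_loop (p : PySem.Set String) (X : List String) (c : PySem.Dict String Int) (w : String) :
    (X.foldl (fun c x => (PySem.Set.ofList (pvSplitSp x)).foldl
        (fun c' w => if PySem.Set.contains p w then c'.insert w (c'.getD w 0 + 1) else c') c) c).getD w 0
    = c.getD w 0 + (if PySem.Set.contains p w then
        (X.countP (fun x => PySem.Set.contains (PySem.Set.ofList (pvSplitSp x)) w) : Int) else 0) := by
  induction X generalizing c with
  | nil => simp
  | cons x X ih =>
    rw [List.foldl_cons, ih, pvB_step_getD p _ (PySem.Set.nodup_ofList _), List.countP_cons]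
    by_cases hc : w ∈ p <;> simp [PySem.Set.contains, hc] <;> push_cast <;> ring

theorem pv_getD_insert_fold (g : String → Int) (l : List String) (d : PySem.Dict String Int) (w : String) :
    (l.foldl (fun d v => d.insert v (g v)) d).getD w 0
    = if w ∈ l then g w else d.getD w 0 := by
  induction l generalizing d with
  | nil => simp
  | cons v l ih =>
    rw [List.foldl_cons, ih]
    by_cases hl : w ∈ l
    · simp [hl]
    · by_cases hv : w = v
      · subst hv; simp [hl, PySem.Dict.getD_insert_self]
      · simp [hl, hv, PySem.Dict.getD_insert_of_ne _ _ _ hv]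

theorem pv_main (X vocab : List String) : compute_df X vocab = compute_df_alt X vocab := by
  unfold compute_df compute_df_alt
  dsimp only
  rw [PySem.List.foldl_append_singleton_eq_map, List.nil_append]
  have hk0 : (vocab.foldl (fun d v => d.insert v 0) (PySem.Dict.empty : PySem.Dict String Int)).keys
      = PySem.Set.ofList vocab := by
    rw [PySem.Dict.keys_foldl_insert]; rfl
  have hnd0 : (vocab.foldl (fun d v => d.insert v 0) (PySem.Dict.empty : PySem.Dict String Int)).keys.Nodup := by
    rw [hk0]; exact PySem.Set.nodup_ofList vocab
  obtain ⟨hkA, hgA⟩ := pvA_loop (X.map fun x => PySem.Set.ofList (pvSplitSp x)) _ hnd0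
  have hkB : (vocab.foldl (fun d v => d.insert v
      ((X.foldl (fun c x => (PySem.Set.ofList (pvSplitSp x)).foldl
        (fun c' w => if PySem.Set.contains (PySem.Set.ofList vocab) w then c'.insert w (c'.getD w 0 + 1) else c') c)
        PySem.Dict.empty).getD v 0)) (PySem.Dict.empty : PySem.Dict String Int)).keys
      = PySem.Set.ofList vocab := by
    rw [PySem.Dict.keys_foldl_insert]; rfl
  rw [PySem.Dict.items_eq_map_keys _ (by rw [hkA]; exact hnd0) 0,
      PySem.Dict.items_eq_map_keys _ (by rw [hkB]; exact PySem.Set.nodup_ofList vocab) 0,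
      hkA, hk0, hkB]
  apply List.map_congr_left
  intro k hk
  have hkin : k ∈ vocab := (PySem.Set.mem_ofList vocab k).mp hk
  have hcp : PySem.Set.contains (PySem.Set.ofList vocab) k = true :=
    (pv_contains_iff _ _).mpr hk
  rw [hgA k (by rw [hk0]; exact hk)]
  rw [pv_getD_insert_fold (fun _ => (0:Int)) vocab PySem.Dict.empty k, if_pos hkin]
  rw [pv_getD_insert_fold _ vocab PySem.Dict.empty k, if_pos hkin]
  rw [pvB_loop (PySem.Set.ofList vocab) X PySem.Dict.empty k, if_pos hcp]
  rw [List.countP_map]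
  simp [Function.comp_def, PySem.Set.contains, PySem.Set.mem_ofList]

-- ===== VERDICT (by name: the statement is the Claim_ definition above) =====
theorem compute_df_spec : Claim_equal_compute_df := by
  intro X vocab _
  exact pv_main X vocab
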